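-- pv_equiv track=rewrite | github.com/Ahilandhas/GFG_mathematics | Exactly 3 Divisors.py | exactly3Divisors
-- ===== SOURCE A (Python) =====
-- import math
--
-- def exactly3Divisors(N):
--      if N <= 3:
--          return 0
--
--      # Sieve up to sqrt(N) since we only care about primes whose squares are <= N
--      limit = int(math.sqrt(N))
--      isPrime = [True] * (limit + 1)
--      isPrime[0], isPrime[1] = False, False  # 0 and 1 are not prime
--
--      i = 2
--      while i * i <= limit:
--          if isPrime[i]:
--              for j in range(i * i, limit + 1, i):
--                  isPrime[j] = False
--          i += 1
--
--      # Count numbers with exactly 3 divisors, i.e., primes' squares <= N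
--      count = 0
--      for i in range(2, limit + 1):
--          if isPrime[i] and i * i <= N:
--              count += 1
--
--      return count
-- ===== SOURCE B (Python) =====
-- import math
--
-- def _is_prime(k):
--     if k < 2:
--         return False
--     d = 2
--     while d * d <= k:
--         if k % d == 0:
--             return False
--         d += 1
--     return True
--
-- def exactly3Divisors(N):
--     if N <= 3:
--         return 0
--     limit = int(math.sqrt(N))
--     count = 0
--     for k in range(2, limit + 1):
--         if _is_prime(k):
--             count += 1
--     return count
-- ===== Notes on version B (the rewrite author's own statement) =====
-- stated objective: simpler
-- what changed: Replaces the sieve-of-Eratosthenes boolean array (plus its separate counting pass with an i*i<=N guard) by a direct per-number trial-division primality test over 2..int(sqrt(N)).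
import Mathlib
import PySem

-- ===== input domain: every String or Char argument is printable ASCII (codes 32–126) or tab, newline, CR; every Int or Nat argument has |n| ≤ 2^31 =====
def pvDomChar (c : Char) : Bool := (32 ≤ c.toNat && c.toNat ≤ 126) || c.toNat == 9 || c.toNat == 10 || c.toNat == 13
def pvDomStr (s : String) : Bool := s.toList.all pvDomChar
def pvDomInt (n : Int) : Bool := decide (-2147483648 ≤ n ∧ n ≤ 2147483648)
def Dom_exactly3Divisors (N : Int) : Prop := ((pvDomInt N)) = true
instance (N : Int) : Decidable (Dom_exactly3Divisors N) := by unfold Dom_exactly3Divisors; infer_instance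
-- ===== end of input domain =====

-- B replaces A's sieve array + counting pass by a direct trial-division primality
-- test per candidate (simpler: no shared mutable array, two short loops).

-- ===== PORT A =====
-- inner 'for j in range(i*i, limit+1, i): isPrime[j] = False'
-- (the '1 ≤ step' conjunct is only a totality guard; every call has step = i ≥ 2)
def markMultiples (limit step : Nat) (j : Nat) (arr : Array Bool) : Array Bool :=
  if h : j ≤ limit ∧ 1 ≤ step then
    markMultiples limit step (j + step) (arr.setIfInBounds j false)
  else arr
termination_by limit + 1 - j
decreasing_by omega

-- outer 'while i * i <= limit' sieve loop
def sieveLoop (limit : Nat) (i : Nat) (arr : Array Bool) : Array Bool :=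
  if h : i * i ≤ limit then
    sieveLoop limit (i + 1) (if arr.getD i false then markMultiples limit i (i * i) arr else arr)
  else arr
termination_by limit + 1 - i
decreasing_by
  rcases Nat.eq_zero_or_pos i with h0 | h0
  · omega
  · have : i ≤ i * i := Nat.le_mul_of_pos_left i h0
    omega

-- 'limit = int(math.sqrt(N))' is ported as Nat.sqrt N.toNat: exact on the domain
-- 0 ≤ N ≤ 2^31 (double sqrt followed by int() equals the integer square root there).
def exactly3Divisors (N : Int) : Int :=
  if N ≤ 3 then 0
  else
    let limit := Nat.sqrt N.toNat
    let isPrime := ((Array.replicate (limit + 1) true).setIfInBounds 0 false).setIfInBounds 1 false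
    let arr := sieveLoop limit 2 isPrime
    -- 'for i in range(2, limit+1): if isPrime[i] and i*i <= N: count += 1'
    ((List.range' 2 (limit - 1)).filter
      (fun i => arr.getD i false && decide ((i : Int) * i ≤ N))).length

-- ===== PORT B =====
-- 'while d*d <= k: if k % d == 0: return False; d += 1'
-- (the '2 ≤ d' conjunct is only a totality guard; every call has d ≥ 2)
def tdLoop (k : Nat) (d : Nat) : Bool :=
  if h : d * d ≤ k ∧ 2 ≤ d then
    (if k % d == 0 then false else tdLoop k (d + 1))
  else true
termination_by k + 1 - d
decreasing_by
  have : d ≤ d * d := Nat.le_mul_of_pos_left d (by omega)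
  omega

def isPrimeB (k : Nat) : Bool := if k < 2 then false else tdLoop k 2

def exactly3Divisors_alt (N : Int) : Int :=
  if N ≤ 3 then 0
  else
    let limit := Nat.sqrt N.toNat
    ((List.range' 2 (limit - 1)).filter (fun k => isPrimeB k)).length

-- ===== PRECONDITION & SPEC =====
def Spec_exactly3Divisors (N : Int) (out : Int) : Prop := out = exactly3Divisors_alt N
instance (N : Int) (out : Int) : Decidable (Spec_exactly3Divisors N out) := by unfold Spec_exactly3Divisors; infer_instance

-- ===== CLAIM (what is proved, stated in full; the proofs are below) =====
def Claim_equal_exactly3Divisors : Prop := ∀ (N : Int), Dom_exactly3Divisors N → Spec_exactly3Divisors N (exactly3Divisors N)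

-- ===== LEMMAS AND PROOFS =====

lemma getD_setIfInBounds (arr : Array Bool) (j x : Nat) (b : Bool) (hj : j < arr.size) :
    (arr.setIfInBounds j b).getD x false = if x = j then b else arr.getD x false := by
  rw [Array.getD_eq_getD_getElem?, Array.getD_eq_getD_getElem?,
      Array.getElem?_setIfInBounds]
  by_cases hjx : j = x
  · rw [if_pos hjx, if_pos hjx.symm, if_pos (hjx ▸ hj)]
    rfl
  · rw [if_neg hjx, if_neg (fun h => hjx h.symm)]

lemma markMultiples_size (limit step j : Nat) (arr : Array Bool) :
    (markMultiples limit step j arr).size = arr.size := by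
  induction j, arr using markMultiples.induct limit step with
  | case1 j arr h ih =>
    rw [markMultiples, dif_pos h, ih, Array.size_setIfInBounds]
  | case2 j arr h => rw [markMultiples, dif_neg h]

lemma markMultiples_getD (limit step : Nat) (hstep : 1 ≤ step) (j x : Nat)
    (arr : Array Bool) (hsz : arr.size = limit + 1) :
    (markMultiples limit step j arr).getD x false =
      if x ≤ limit ∧ j ≤ x ∧ step ∣ (x - j) then false else arr.getD x false := by
  induction j, arr using markMultiples.induct limit step with
  | case1 j arr h ih =>
    rw [markMultiples, dif_pos h,
        ih (by rw [Array.size_setIfInBounds]; exact hsz),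
        getD_setIfInBounds arr j x false (by omega)]
    by_cases hC : x ≤ limit ∧ j + step ≤ x ∧ step ∣ (x - (j + step))
    · rw [if_pos hC, if_pos]
      obtain ⟨h1, h2, t, ht⟩ := hC
      have hst : step * (t + 1) = step * t + step := by ring
      exact ⟨h1, by omega, ⟨t + 1, by omega⟩⟩
    · rw [if_neg hC]
      by_cases hxj : x = j
      · subst hxj
        rw [if_pos rfl, if_pos ⟨h.1, le_refl _, by simp⟩]
      · rw [if_neg hxj]
        by_cases hT : x ≤ limit ∧ j ≤ x ∧ step ∣ (x - j)
        · exfalso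
          obtain ⟨h1, h2, t, ht⟩ := hT
          apply hC
          have hjx : j < x := lt_of_le_of_ne h2 (Ne.symm hxj)
          have ht1 : 1 ≤ t := by
            rcases Nat.eq_zero_or_pos t with h0 | h0
            · subst h0; simp at ht; omega
            · exact h0
          have h5 : step * 1 ≤ step * t := Nat.mul_le_mul_left step ht1
          have h6 : step * 1 = step := by ring
          refine ⟨h1, by omega, ⟨t - 1, ?_⟩⟩
          have hexp : step * t = step * (t - 1) + step := by
            have h' : t = (t - 1) + 1 := by omega
            calc step * t = step * ((t - 1) + 1) := by rw [← h']
              _ = step * (t - 1) + step := by ring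
          omega
        · rw [if_neg hT]
  | case2 j arr h =>
    rw [markMultiples, dif_neg h, if_neg]
    rintro ⟨h1, h2, -⟩
    exact h ⟨by omega, hstep⟩

-- the set of numbers the sieve has crossed out after the counter reached v
def Marked (v x : Nat) : Prop := x < 2 ∨ ∃ p, Nat.Prime p ∧ p < v ∧ p ∣ x ∧ p ≠ x

lemma marked_of_not_prime {v x limit : Nat} (hx2 : 2 ≤ x) (hxl : x ≤ limit)
    (hlt : limit < v * v) (hnp : ¬ Nat.Prime x) : Marked v x := by
  right
  have hq := Nat.minFac_prime (show x ≠ 1 by omega)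
  have hdvd := Nat.minFac_dvd x
  have hne : x.minFac ≠ x := fun h => hnp (h ▸ hq)
  have hsq : x.minFac * x.minFac ≤ x := by
    have h' := Nat.minFac_sq_le_self (show 0 < x by omega) hnp
    nlinarith [h']
  have hlt2 : x.minFac < v := by
    by_contra h
    push_neg at h
    have : v * v ≤ x.minFac * x.minFac := Nat.mul_le_mul h h
    omega
  exact ⟨x.minFac, hq, hlt2, hdvd, hne⟩

lemma prime_of_not_marked {v x : Nat} (hx2 : 2 ≤ x) (hxv : x ≤ v)
    (h : ¬ Marked v x) : Nat.Prime x := by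
  by_contra hnp
  apply h
  right
  have hq := Nat.minFac_prime (show x ≠ 1 by omega)
  have hdvd := Nat.minFac_dvd x
  have hne : x.minFac ≠ x := fun he => hnp (he ▸ hq)
  have hle : x.minFac ≤ x := Nat.minFac_le (by omega)
  exact ⟨x.minFac, hq, by omega, hdvd, hne⟩

lemma not_marked_prime {v x : Nat} (hp : Nat.Prime x) : ¬ Marked v x := by
  rintro (h | ⟨p, hp', hlt, hdvd, hne⟩)
  · exact absurd hp.two_le (by omega)
  · rcases (Nat.Prime.eq_one_or_self_of_dvd hp p hdvd) with h1 | h1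
    · exact hp'.one_lt.ne' h1
    · exact hne h1

lemma sieveLoop_getD (limit : Nat) (v : Nat) (arr : Array Bool) : 2 ≤ v →
    arr.size = limit + 1 →
    (∀ x, x ≤ limit → ((arr.getD x false = false) ↔ Marked v x)) →
    ∀ x, x ≤ limit → (((sieveLoop limit v arr).getD x false = false) ↔ ¬ Nat.Prime x) := by
  induction v, arr using sieveLoop.induct limit with
  | case1 v arr h ih =>
    intro hv hsz hinv x hx
    rw [sieveLoop, dif_pos h]
    have hvle : v ≤ limit := le_trans (Nat.le_mul_of_pos_left v (by omega)) h
    by_cases hb : arr.getD v false = true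
    · -- arr[v] = true: v is prime; mark its multiples from v*v
      rw [if_pos hb]
      rw [dif_pos hb] at ih
      have hvp : Nat.Prime v := by
        apply prime_of_not_marked hv (le_refl v)
        intro hm
        rw [← hinv v hvle] at hm
        simp [hb] at hm
      apply ih (by omega) (by rw [markMultiples_size]; exact hsz) ?_ x hx
      -- new invariant at v+1
      intro y hy
      rw [markMultiples_getD limit v (by omega) (v * v) y arr hsz]
      constructor
      · intro hfalse
        by_cases hC : y ≤ limit ∧ v * v ≤ y ∧ v ∣ (y - v * v)
        · obtain ⟨h1, h2, t, ht⟩ := hC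
          right
          have e1 : v * (v + t) = v * v + v * t := by ring
          have e2 : 2 * v ≤ v * v := Nat.mul_le_mul_right v hvp.two_le
          exact ⟨v, hvp, by omega, ⟨v + t, by omega⟩, by omega⟩
        · rw [if_neg hC] at hfalse
          rcases (hinv y hy).mp hfalse with h' | ⟨p, hp', hlt, hdvd, hne⟩
          · exact Or.inl h'
          · exact Or.inr ⟨p, hp', by omega, hdvd, hne⟩
      · rintro (h' | ⟨p, hp', hlt, hdvd, hne⟩)
        · split_ifs with hC
          · rfl
          · exact (hinv y hy).mpr (Or.inl h')
        · by_cases hpv : p = v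
          · subst hpv
            obtain ⟨m, hm⟩ := hdvd
            by_cases hyv : p * p ≤ y
            · have hmge : p ≤ m := by
                have h' := hyv
                rw [hm] at h'
                exact Nat.le_of_mul_le_mul_left h' (by omega)
              have e : p * (m - p) + p * p = p * m := by
                rw [← Nat.mul_add, Nat.sub_add_cancel hmge]
              rw [if_pos ⟨hy, hyv, ⟨m - p, by omega⟩⟩]
            · -- y < p*p : y = p*m with m < p, so a smaller prime already marked y
              split_ifs with hC
              · rfl
              apply (hinv y hy).mpr
              push_neg at hyv
              have hp2 := hp'.two_le
              have hm_lt : m < p := by nlinarith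
              rcases Nat.lt_or_ge m 2 with hm2 | hm2
              · interval_cases m
                · exact Or.inl (by omega)
                · exact absurd hm (by omega)
              · right
                have hq := Nat.minFac_prime (show m ≠ 1 by omega)
                have hqle : m.minFac ≤ m := Nat.minFac_le (by omega)
                refine ⟨m.minFac, hq, by omega,
                  hm ▸ Dvd.dvd.mul_left (Nat.minFac_dvd m) p, ?_⟩
                have : m < y := by nlinarith
                omega
          · split_ifs with hC
            · rfl
            · exact (hinv y hy).mpr (Or.inr ⟨p, hp', by omega, hdvd, hne⟩)
    · -- arr[v] = false: v is already marked, hence not prime; array unchanged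
      rw [if_neg hb]
      rw [dif_neg hb] at ih
      rw [Bool.not_eq_true] at hb
      have hvm : Marked v v := (hinv v hvle).mp hb
      have hvnp : ¬ Nat.Prime v := fun hp => not_marked_prime hp hvm
      apply ih (by omega) hsz ?_ x hx
      intro y hy
      rw [hinv y hy]
      constructor
      · rintro (h' | ⟨p, hp', hlt, hdvd, hne⟩)
        · exact Or.inl h'
        · exact Or.inr ⟨p, hp', by omega, hdvd, hne⟩
      · rintro (h' | ⟨p, hp', hlt, hdvd, hne⟩)
        · exact Or.inl h'
        · have hne2 : p ≠ v := fun he => hvnp (he ▸ hp')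
          exact Or.inr ⟨p, hp', by omega, hdvd, hne⟩
  | case2 v arr h =>
    intro hv hsz hinv x hx
    rw [sieveLoop, dif_neg h, hinv x hx]
    push_neg at h
    constructor
    · exact fun hm hp => not_marked_prime hp hm
    · intro hnp
      rcases Nat.lt_or_ge x 2 with h2 | h2
      · exact Or.inl h2
      · exact marked_of_not_prime h2 hx h hnp

lemma tdLoop_true_iff (k : Nat) (d : Nat) : 2 ≤ d →
    (tdLoop k d = true ↔ ∀ m, d ≤ m → m * m ≤ k → ¬ m ∣ k) := by
  induction d using tdLoop.induct k with
  | case1 d h hmod =>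
    intro hd
    rw [tdLoop, dif_pos h, if_pos hmod]
    simp only [beq_iff_eq] at hmod
    simp only [Bool.false_eq_true, false_iff]
    push_neg
    exact ⟨d, le_refl d, h.1, Nat.dvd_of_mod_eq_zero hmod⟩
  | case2 d h hmod ih =>
    intro hd
    rw [tdLoop, dif_pos h, if_neg hmod, ih (by omega)]
    simp only [beq_iff_eq] at hmod
    constructor
    · intro hall m hm hmk
      rcases Nat.eq_or_lt_of_le hm with he | hlt
      · subst he
        exact fun hdvd => hmod (Nat.mod_eq_zero_of_dvd hdvd)
      · exact hall m hlt hmk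
    · intro hall m hm hmk
      exact hall m (by omega) hmk
  | case3 d h =>
    intro hd
    rw [tdLoop, dif_neg h]
    simp only [true_iff]
    intro m hm hmk hdvd
    have hdd : ¬ d * d ≤ k := fun c => h ⟨c, hd⟩
    have hmm : d * d ≤ m * m := Nat.mul_le_mul hm hm
    omega

lemma isPrimeB_eq (k : Nat) : isPrimeB k = decide (Nat.Prime k) := by
  unfold isPrimeB
  by_cases h2 : k < 2
  · rw [if_pos h2]
    have hnp : ¬ Nat.Prime k := fun hp => absurd hp.two_le (by omega)
    simp [hnp]
  · push_neg at h2
    rw [if_neg (by omega)]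
    by_cases hp : Nat.Prime k
    · simp only [hp, decide_true]
      rw [tdLoop_true_iff k 2 (le_refl 2)]
      intro m hm hmk hdvd
      rcases (hp.eq_one_or_self_of_dvd m hdvd) with h | h
      · omega
      · subst h
        have : m * 2 ≤ m * m := Nat.mul_le_mul_left m hm
        omega
    · simp only [hp, decide_false]
      rw [Bool.eq_false_iff, Ne, tdLoop_true_iff k 2 (le_refl 2)]
      intro hall
      apply hp
      rw [Nat.prime_def_le_sqrt]
      exact ⟨h2, fun m hm hms => hall m hm (Nat.le_sqrt.mp hms)⟩

-- ===== VERDICT (by name: the statement is the Claim_ definition above) =====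
theorem exactly3Divisors_spec : Claim_equal_exactly3Divisors := by
  intro N _hdom
  unfold Spec_exactly3Divisors exactly3Divisors exactly3Divisors_alt
  by_cases hN : N ≤ 3
  · simp [hN]
  · simp only [if_neg hN]
    push_neg at hN
    set n := N.toNat with hn
    have hn4 : 4 ≤ n := by omega
    set limit := Nat.sqrt n with hlim
    have hlim2 : 2 ≤ limit := Nat.le_sqrt.mpr (by omega)
    have hfil : (List.range' 2 (limit - 1)).filter
        (fun i => (sieveLoop limit 2 (((Array.replicate (limit + 1) true).setIfInBounds 0
            false).setIfInBounds 1 false)).getD i false && decide ((i : Int) * i ≤ N)) =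
        (List.range' 2 (limit - 1)).filter (fun k => isPrimeB k) := by
      apply List.filter_congr
      intro x hx
      rw [List.mem_range'_1] at hx
      have hx2 : 2 ≤ x := hx.1
      have hxl : x ≤ limit := by omega
      -- sieve output = primality
      set arr0 := ((Array.replicate (limit + 1) true).setIfInBounds 0 false).setIfInBounds 1 false with harr0
      have hsz : arr0.size = limit + 1 := by
        simp [harr0, Array.size_setIfInBounds, Array.size_replicate]
      have hinit : ∀ y, y ≤ limit → ((arr0.getD y false = false) ↔ Marked 2 y) := by
        intro y hy
        rw [harr0, getD_setIfInBounds _ 1 y false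
              (by rw [Array.size_setIfInBounds, Array.size_replicate]; omega),
            getD_setIfInBounds _ 0 y false
              (by rw [Array.size_replicate]; omega)]
        unfold Array.getD
        have hylt : y < (Array.replicate (limit + 1) true).size := by
          simp [Array.size_replicate]; omega
        constructor
        · intro hfalse
          split_ifs at hfalse with h1 h0
          · exact Or.inl (by omega)
          · exact Or.inl (by omega)
          · simp [hylt, Array.getElem_replicate] at hfalse
        · rintro (h' | ⟨p, hp', hlt, hdvd, hne⟩)
          · interval_cases y <;> simp
          · exact absurd hp'.two_le (by omega)
      have hs := sieveLoop_getD limit 2 arr0 (le_refl 2) hsz hinit x hxl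
      have hprime : ((sieveLoop limit 2 arr0).getD x false = true) ↔ Nat.Prime x := by
        rw [← Bool.not_eq_false, hs, not_not]
      have hxxN : (x : Int) * x ≤ N := by
        have h1 : x * x ≤ n := Nat.le_sqrt.mp hxl
        have h2 : (n : Int) = N := Int.toNat_of_nonneg (by omega)
        calc ((x : Int) * x) = ((x * x : Nat) : Int) := by push_cast; ring
          _ ≤ (n : Int) := by exact_mod_cast h1
          _ = N := h2
      rw [isPrimeB_eq]
      by_cases hp : Nat.Prime x
      · simp [hprime.mpr hp, hp, hxxN]
      · simp only [hp, decide_false]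
        have : (sieveLoop limit 2 arr0).getD x false = false := hs.mpr hp
        simp [this]
    rw [hfil]
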